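-- pv_equiv track=rewrite | github.com/0marPay/promujer | hubspot/hubspot.py | keeping_good
-- ===== SOURCE A (Python) =====
-- def keeping_good(columns):
--     good = ["RecordId"]
--     good += ["Correo", "Celular", "Telefono", "Curp", "Numero"]
--     good += ["Email", "Cell", "Telephone", "Dni", "Number"]
--     good += ["Pais", "Nombre", "Apellido","Nacimiento"]
--     good += ["Contry", "Name", "Lastname", "Surname", "Birthdate"]
--     good += ["Rut", "Rfc"] # RUT es el documento de identidad nacional en chile
--
--     diccionario = {e:i for i,e in enumerate(columns) if any(g in e for g in good)}
--
--     # Eliminar los pares llave/valor con valor mayor o igual a 64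
--     diccionario = {k: v for k, v in diccionario.items() if len(k) < 50}
--
--     # Identificar valores que ya aparecen anteriormente al convertirlos a minúsculas
--
--     valores = list(diccionario.keys())
--     valores_lower = [valor.lower() for valor in valores]
--     valores = set([valores[i] for i in range(len(valores)) if valores_lower.count(valores_lower[i]) <= 1])
--
--     return {k:diccionario[k] for k in valores}
-- ===== SOURCE B (Python) =====
-- def _singleton_runs(keys):
--     # keys is sorted case-insensitively: peel off the leading run of equal
--     # lowercase form, keep its member only when the run has length exactly 1
--     if not keys:
--         return []
--     low = keys[0].lower()
--     j = 1
--     while j < len(keys) and keys[j].lower() == low: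
--         j += 1
--     rest = _singleton_runs(keys[j:])
--     return ([keys[0]] if j == 1 else []) + rest
--
--
-- def keeping_good(columns):
--     good = ["RecordId",
--             "Correo", "Celular", "Telefono", "Curp", "Numero",
--             "Email", "Cell", "Telephone", "Dni", "Number",
--             "Pais", "Nombre", "Apellido", "Nacimiento",
--             "Contry", "Name", "Lastname", "Surname", "Birthdate",
--             "Rut", "Rfc"]
--     # one pass: keep matching, short-enough column names (last index wins, like the dict comprehension)
--     cand = {}
--     for i, e in enumerate(columns):
--         if len(e) < 50 and any(g in e for g in good):
--             cand[e] = i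
--     # sort the surviving keys case-insensitively, then scan adjacent runs:
--     # a key survives iff its lowercase run is a singleton
--     unique = set(_singleton_runs(sorted(cand, key=str.lower)))
--     return {k: v for k, v in cand.items() if k in unique}
-- ===== Notes on version B (the rewrite author's own statement) =====
-- stated objective: alternative
-- what changed: B builds the candidates in one combined-filter pass, then replaces A's count-per-key dedup by a sort-then-scan: it sorts the candidate keys case-insensitively and walks the sorted list grouping adjacent equal-lowercase runs, keeping only keys whose run is a singleton.
import Mathlib
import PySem

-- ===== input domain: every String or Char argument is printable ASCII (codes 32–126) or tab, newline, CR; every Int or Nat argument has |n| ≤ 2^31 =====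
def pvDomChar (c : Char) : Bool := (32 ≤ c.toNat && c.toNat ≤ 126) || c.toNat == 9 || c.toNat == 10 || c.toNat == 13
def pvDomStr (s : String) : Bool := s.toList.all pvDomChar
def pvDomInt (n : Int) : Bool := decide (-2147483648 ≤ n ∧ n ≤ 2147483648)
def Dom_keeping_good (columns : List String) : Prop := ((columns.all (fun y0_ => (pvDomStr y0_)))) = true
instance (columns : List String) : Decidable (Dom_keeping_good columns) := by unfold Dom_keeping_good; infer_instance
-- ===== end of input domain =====

-- B replaces A's count-per-key case-insensitive dedup by a sort-then-scan over adjacent lowercase runs (alternative decomposition, same result).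

-- the constant list `good` (the same in both programs)
def goodWords : List String :=
  ["RecordId"] ++ ["Correo", "Celular", "Telefono", "Curp", "Numero"]
  ++ ["Email", "Cell", "Telephone", "Dni", "Number"]
  ++ ["Pais", "Nombre", "Apellido", "Nacimiento"]
  ++ ["Contry", "Name", "Lastname", "Surname", "Birthdate"]
  ++ ["Rut", "Rfc"]

-- ===== PORT A =====
-- indexing valores[i]/valores_lower[i] via getD is exact (i ranges over valid indices);
-- diccionario[k] via getD is exact (k is always a key of diccionario).
def keeping_good (columns : List String) : List (String × Int) :=
  let diccionario : PySem.Dict String Int :=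
    (PySem.List.enumerate columns 0).foldl
      (fun d p => if goodWords.any (fun g => PySem.Str.isIn g p.2) then d.insert p.2 p.1 else d)
      PySem.Dict.empty
  let diccionario2 : PySem.Dict String Int :=
    diccionario.items.foldl
      (fun d kv => if PySem.Str.len kv.1 < 50 then d.insert kv.1 kv.2 else d)
      PySem.Dict.empty
  let valores := diccionario2.keys
  let valores_lower := valores.map PySem.Str.lower
  let chosen := (List.range valores.length).filterMap
      (fun i => if valores_lower.count (valores_lower.getD i "") ≤ 1
                then some (valores.getD i "") else none)
  let valoresSet : PySem.Set String := PySem.Set.ofList chosen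
  (valoresSet.foldl (fun d k => d.insert k (diccionario2.getD k 0)) PySem.Dict.empty).items

-- ===== PORT B =====
-- _singleton_runs: peel the leading run of equal lowercase form (keys[1:j] = takeWhile,
-- keys[j:] = dropWhile), keep keys[0] only when the run is a singleton (j == 1)
def singletonRuns : List String → List String
  | [] => []
  | x :: t =>
      (if (t.takeWhile (fun y => PySem.Str.lower y == PySem.Str.lower x)).isEmpty
       then [x] else [])
      ++ singletonRuns (t.dropWhile (fun y => PySem.Str.lower y == PySem.Str.lower x))
termination_by l => l.length
decreasing_by
  exact Nat.lt_succ_of_le (List.length_dropWhile_le _ _)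

def keeping_good_alt (columns : List String) : List (String × Int) :=
  let cand : PySem.Dict String Int :=
    (PySem.List.enumerate columns 0).foldl
      (fun d p => if PySem.Str.len p.2 < 50 && goodWords.any (fun g => PySem.Str.isIn g p.2)
                  then d.insert p.2 p.1 else d)
      PySem.Dict.empty
  let unique : PySem.Set String :=
    PySem.Set.ofList (singletonRuns (PySem.List.sorted cand.keys PySem.Str.lower false))
  (cand.items.foldl
      (fun d kv => if PySem.Set.contains unique kv.1 then d.insert kv.1 kv.2 else d)
      PySem.Dict.empty).items

-- ===== PRECONDITION & SPEC =====
def Spec_keeping_good (columns : List String) (out : List (String × Int)) : Prop := out = keeping_good_alt columns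
instance (columns : List String) (out : List (String × Int)) : Decidable (Spec_keeping_good columns out) := by unfold Spec_keeping_good; infer_instance

-- ===== CLAIM (what is proved, stated in full; the proofs are below) =====
def Claim_equal_keeping_good : Prop := ∀ (columns : List String), Dom_keeping_good columns → Spec_keeping_good columns (keeping_good columns)

-- ===== LEMMAS AND PROOFS =====

-- keys of any insert-or-skip loop stay Nodup
theorem pv_nodup_fold {α : Type} (l : List α)
    (f : PySem.Dict String Int → α → PySem.Dict String Int)
    (d : PySem.Dict String Int) (h : d.keys.Nodup)
    (hstep : ∀ d a, d.keys.Nodup → (f d a).keys.Nodup) : ((l.foldl f d).keys).Nodup := by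
  induction l generalizing d with
  | nil => exact h
  | cons a t ih => exact ih _ (hstep _ _ h)

-- a conditional-insert loop over pairs with fresh distinct keys appends a filter
theorem pv_items_condInsert_fresh (l : List (String × Int)) (Q : String → Prop) [DecidablePred Q]
    (d : PySem.Dict String Int)
    (hfresh : ∀ kv ∈ l, d.contains kv.1 = false) (hnd : (l.map Prod.fst).Nodup) :
    ((l.foldl (fun d kv => if Q kv.1 then d.insert kv.1 kv.2 else d) d).items)
      = d.items ++ l.filter (fun kv => decide (Q kv.1)) := by
  induction l generalizing d with
  | nil => simp
  | cons a t ih =>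
      simp only [List.map_cons, List.nodup_cons] at hnd
      simp only [List.foldl_cons, List.filter_cons]
      by_cases hq : Q a.1
      · simp only [hq, if_pos, decide_true]
        rw [ih _ ?_ hnd.2, PySem.Dict.items_insert_of_not_contains _ _ (hfresh a (by simp))]
        · simp
        · intro kv hkv
          rw [PySem.Dict.contains_insert]
          have h1 : kv.1 ≠ a.1 := by
            intro he; exact hnd.1 (he ▸ List.mem_map_of_mem hkv)
          simp [h1, hfresh kv (List.mem_cons_of_mem _ hkv)]
      · simp only [hq, if_neg, not_false_iff, decide_false]
        exact ih _ (fun kv hkv => hfresh kv (List.mem_cons_of_mem _ hkv)) hnd.2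

-- building the dict with the combined condition = building it with the match condition, then filtering by length
theorem pv_comm (l : List (Int × String)) :
    ((l.foldl
        (fun d p => if PySem.Str.len p.2 < 50 && goodWords.any (fun g => PySem.Str.isIn g p.2)
                    then d.insert p.2 p.1 else d)
        (PySem.Dict.empty : PySem.Dict String Int)).items)
    = ((l.foldl
        (fun d p => if goodWords.any (fun g => PySem.Str.isIn g p.2) then d.insert p.2 p.1 else d)
        (PySem.Dict.empty : PySem.Dict String Int)).items).filter
        (fun kv => decide (PySem.Str.len kv.1 < 50)) := by
  induction l using List.reverseRecOn with
  | nil => rfl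
  | append_singleton t p ih =>
      rw [List.foldl_append, List.foldl_append]
      simp only [List.foldl_cons, List.foldl_nil]
      set DB := t.foldl
        (fun d p => if PySem.Str.len p.2 < 50 && goodWords.any (fun g => PySem.Str.isIn g p.2)
                    then d.insert p.2 p.1 else d)
        (PySem.Dict.empty : PySem.Dict String Int) with hDB
      set DA := t.foldl
        (fun d p => if goodWords.any (fun g => PySem.Str.isIn g p.2) then d.insert p.2 p.1 else d)
        (PySem.Dict.empty : PySem.Dict String Int) with hDA
      have hqf : ∀ w : Int, (fun p' : String × Int =>
            decide (PySem.Str.len (if p'.1 == p.2 then (p.2, w) else p').1 < 50))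
          = (fun p' : String × Int => decide (PySem.Str.len p'.1 < 50)) := by
        intro w; funext p'
        by_cases h : p'.1 == p.2
        · have : p'.1 = p.2 := eq_of_beq h
          simp [this]
        · simp [h]
      by_cases hP : goodWords.any (fun g => PySem.Str.isIn g p.2) = true
      · by_cases hQ : PySem.Str.len p.2 < 50
        · have hQn : ((p.2.length : Int) < 50) := by simpa using hQ
          have hQnn : p.2.length < 50 := by exact_mod_cast hQn
          rw [if_pos (by simp only [Bool.and_eq_true, decide_eq_true_eq]; exact ⟨hQ, hP⟩),
              if_pos hP]
          by_cases hc : DA.contains p.2 = true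
          · have hcB : DB.contains p.2 = true := by
              rw [PySem.Dict.contains_iff_mem_keys] at hc ⊢
              simp only [PySem.Dict.keys] at hc ⊢
              rw [ih] at *
              obtain ⟨kv, hkv, hfst⟩ := List.mem_map.mp hc
              exact List.mem_map.mpr ⟨kv, List.mem_filter.mpr
                ⟨hkv, by simpa [hfst] using hQ⟩, hfst⟩
            rw [PySem.Dict.items_insert_of_contains _ _ hc,
                PySem.Dict.items_insert_of_contains _ _ hcB, ih, List.filter_map]
            simp only [Function.comp_def]
            rw [hqf p.1]
          · have hcf : DA.contains p.2 = false := Bool.eq_false_iff.mpr hc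
            have hcB : DB.contains p.2 = false := by
              refine Bool.eq_false_iff.mpr (fun hcB => hc ?_)
              rw [PySem.Dict.contains_iff_mem_keys] at hcB ⊢
              simp only [PySem.Dict.keys] at hcB ⊢
              rw [ih] at hcB
              obtain ⟨kv, hkv, hfst⟩ := List.mem_map.mp hcB
              exact List.mem_map.mpr ⟨kv, (List.mem_filter.mp hkv).1, hfst⟩
            rw [PySem.Dict.items_insert_of_not_contains _ _ hcf,
                PySem.Dict.items_insert_of_not_contains _ _ hcB, ih, List.filter_append]
            simp [hQnn]
        · have hQn : ¬ ((p.2.length : Int) < 50) := by simpa using hQ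
          have hQnn : ¬ p.2.length < 50 := by
            intro h; exact hQn (by exact_mod_cast h)
          have hcondB : ¬ ((PySem.Str.len p.2 < 50 : Bool) && goodWords.any (fun g => PySem.Str.isIn g p.2)) = true := by
            simp only [Bool.and_eq_true, decide_eq_true_eq]
            exact fun h => absurd h.1 hQ
          rw [if_neg hcondB, if_pos hP]
          by_cases hc : DA.contains p.2 = true
          · rw [PySem.Dict.items_insert_of_contains _ _ hc, List.filter_map]
            simp only [Function.comp_def]
            rw [hqf p.1, ih]
            symm
            refine (List.map_congr_left ?_).trans (List.map_id _)
            intro kv hkv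
            have h1 : ((kv.1.length : Int) < 50) := by
              have := (List.mem_filter.mp hkv).2; simpa using this
            have h2 : ¬ (kv.1 == p.2) = true := by
              intro hb; exact hQn (eq_of_beq hb ▸ h1)
            simp [h2]
          · rw [PySem.Dict.items_insert_of_not_contains _ _ (Bool.eq_false_iff.mpr hc),
                List.filter_append, ih]
            simp [hQnn]
      · rw [if_neg (by simp only [Bool.and_eq_true]; exact fun h => hP h.2), if_neg hP]
        exact ih

-- the indexed comprehension over range(len(l)) is a filter
theorem pv_filterMap_range (l : List String) (g : String → String)
    (q : String → Prop) [DecidablePred q] :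
    (List.range l.length).filterMap
        (fun i => if q ((l.map g).getD i "") then some (l.getD i "") else none)
      = l.filter (fun x => decide (q (g x))) := by
  induction l using List.reverseRecOn with
  | nil => rfl
  | append_singleton t a ih =>
      rw [List.length_append, List.length_cons, List.length_nil, List.range_succ,
          List.filterMap_append, List.filter_append]
      congr 1
      · rw [← ih]
        refine List.filterMap_congr ?_
        intro i hi
        have hlt : i < t.length := List.mem_range.mp hi
        rw [List.map_append, List.getD_append _ _ _ _ (by simpa using hlt),
            List.getD_append _ _ _ _ hlt]
      · have h1 : ((t ++ [a]).map g).getD t.length "" = g a := by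
          rw [List.map_append, List.getD_append_right _ _ _ _ (by simp), List.length_map]
          simp
        have h2 : (t ++ [a]).getD t.length "" = a := by
          rw [List.getD_append_right _ _ _ _ (by simp)]
          simp
        simp only [List.filterMap_cons, List.filterMap_nil, h1, h2, List.filter_cons,
          List.filter_nil]
        by_cases hq : q (g a) <;> simp [hq]

-- set() of a duplicate-free list is that list
theorem pv_ofList_nodup (l : List String) (h : l.Nodup) : PySem.Set.ofList l = l := by
  rw [← PySem.Set.update_nil_left, PySem.Set.update_eq_append_of_disjoint _ _ h (by simp)]
  simp

-- singletonRuns only returns members of its input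
theorem singletonRuns_subset (l : List String) : ∀ x ∈ singletonRuns l, x ∈ l := by
  induction l using singletonRuns.induct with
  | case1 => intro x hx; simp [singletonRuns] at hx
  | case2 a t ih =>
      intro x hx
      rw [singletonRuns] at hx
      rcases List.mem_append.mp hx with h | h
      · split at h
        · simp at h; simp [h]
        · simp at h
      · exact List.mem_cons_of_mem _
          (List.dropWhile_sublist _ |>.mem (ih x h))

-- on a case-insensitively sorted list, membership in singletonRuns is
-- "the lowercase form occurs exactly once"
theorem singletonRuns_mem (l : List String)
    (hs : l.Pairwise (fun a b => PySem.Str.lower a ≤ PySem.Str.lower b)) :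
    ∀ x ∈ l, (x ∈ singletonRuns l ↔ (l.map PySem.Str.lower).count (PySem.Str.lower x) = 1) := by
  induction l using singletonRuns.induct with
  | case1 => intro x hx; simp at hx
  | case2 a t ih =>
      intro x hx
      have hpa : ∀ y ∈ t, PySem.Str.lower a ≤ PySem.Str.lower y :=
        fun y hy => (List.pairwise_cons.mp hs).1 y hy
      have hst : t.Pairwise (fun a b => PySem.Str.lower a ≤ PySem.Str.lower b) :=
        (List.pairwise_cons.mp hs).2
      set p := (fun y => PySem.Str.lower y == PySem.Str.lower a) with hp
      set run := t.takeWhile p with hrun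
      set rest := t.dropWhile p with hrest
      have htdec : t = run ++ rest := (List.takeWhile_append_dropWhile).symm
      have hrunlow : ∀ y ∈ run, PySem.Str.lower y = PySem.Str.lower a := by
        intro y hy
        have := List.mem_takeWhile_imp hy
        exact eq_of_beq this
      have hrestlow : ∀ y ∈ rest, PySem.Str.lower y ≠ PySem.Str.lower a := by
        cases hre : rest with
        | nil => intro y hy; simp at hy
        | cons h r =>
            have hhead : ¬ p h = true := by
              have := List.head?_dropWhile_not p t
              rw [← hrest, hre] at this
              simpa using this
            have hhne : PySem.Str.lower h ≠ PySem.Str.lower a := by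
              simpa [hp] using hhead
            have hhmem : h ∈ t := by rw [htdec, hre]; simp
            have hha : PySem.Str.lower a ≤ PySem.Str.lower h := hpa h hhmem
            have hlt : PySem.Str.lower a < PySem.Str.lower h :=
              lt_of_le_of_ne hha (Ne.symm hhne)
            have hrpair : (h :: r).Pairwise (fun a b => PySem.Str.lower a ≤ PySem.Str.lower b) := by
              rw [← hre]; exact hst.sublist (List.dropWhile_sublist _)
            intro y hy
            rcases List.mem_cons.mp hy with rfl | hyr
            · exact hhne
            · have : PySem.Str.lower h ≤ PySem.Str.lower y :=
                (List.pairwise_cons.mp hrpair).1 y hyr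
              exact fun he => absurd (he ▸ this) (not_le.mpr hlt)
      have hrestpair : rest.Pairwise (fun a b => PySem.Str.lower a ≤ PySem.Str.lower b) :=
        hst.sublist (List.dropWhile_sublist _)
      have hcntrun : (run.map PySem.Str.lower).count (PySem.Str.lower a) = run.length := by
        have hlen : run.length = (run.map PySem.Str.lower).length := by simp
        rw [hlen, List.count_eq_length]
        intro b hb
        obtain ⟨y, hy, rfl⟩ := List.mem_map.mp hb
        exact (hrunlow y hy).symm
      rw [singletonRuns, ← hp, ← hrun, ← hrest]
      by_cases hlx : PySem.Str.lower x = PySem.Str.lower a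
      · -- x belongs to the head group
        have hxnr : x ∉ rest := fun hxr => hrestlow x hxr hlx
        have hxns : x ∉ singletonRuns rest := fun hxs => hxnr (singletonRuns_subset _ _ hxs)
        have hcnt : ((a :: t).map PySem.Str.lower).count (PySem.Str.lower x)
            = 1 + run.length := by
          rw [htdec]
          simp only [List.map_cons, List.map_append, List.count_cons, List.count_append]
          have hzero : (rest.map PySem.Str.lower).count (PySem.Str.lower a) = 0 := by
            rw [List.count_eq_zero]
            intro hmem
            obtain ⟨y, hy, hey⟩ := List.mem_map.mp hmem
            exact hrestlow y hy hey
          rw [hlx, hcntrun, hzero]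
          simp [Nat.add_comm]
        cases hre : run with
        | nil =>
            have hxa : x = a := by
              rcases List.mem_cons.mp hx with rfl | hxt
              · rfl
              · rw [htdec, hre] at hxt
                simp at hxt
                exact absurd hxt hxnr
            constructor
            · intro _
              rw [hcnt, hre]
              rfl
            · intro _
              simp [hxa]
        | cons rh rr =>
            constructor
            · intro hmem
              rcases List.mem_append.mp hmem with h | h
              · simp at h
              · exact absurd h hxns
            · intro hc
              rw [hcnt] at hc
              exact absurd hc (by simp [hre])
      · -- x is in the rest
        have hxt : x ∈ t := by
          rcases List.mem_cons.mp hx with rfl | hxt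
          · exact absurd rfl hlx
          · exact hxt
        have hxr : x ∈ rest := by
          rw [htdec] at hxt
          rcases List.mem_append.mp hxt with h | h
          · exact absurd (hrunlow x h) hlx
          · exact h
        have hcnt : ((a :: t).map PySem.Str.lower).count (PySem.Str.lower x)
            = (rest.map PySem.Str.lower).count (PySem.Str.lower x) := by
          rw [htdec]
          simp only [List.map_cons, List.map_append, List.count_cons, List.count_append]
          have h1 : ¬ (PySem.Str.lower a = PySem.Str.lower x) := fun h => hlx h.symm
          have h2 : (run.map PySem.Str.lower).count (PySem.Str.lower x) = 0 := by
            rw [List.count_eq_zero]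
            intro hmem
            obtain ⟨y, hy, hey⟩ := List.mem_map.mp hmem
            exact hlx (hey ▸ hrunlow y hy)
          rw [h2]
          simp [h1]
        rw [hcnt, ← ih hrestpair x hxr]
        have hxna : x ∉ (if (run.isEmpty) = true then [a] else ([] : List String)) := by
          split
          · intro h; simp at h; exact hlx (h ▸ rfl)
          · simp
        constructor
        · intro hmem
          rcases List.mem_append.mp hmem with h | h
          · exact absurd h hxna
          · exact h
        · intro h; exact List.mem_append.mpr (Or.inr h)

-- proof-side names for the pipeline stages of the two ports
def pvD1 (columns : List String) : PySem.Dict String Int :=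
  (PySem.List.enumerate columns 0).foldl
    (fun d p => if goodWords.any (fun g => PySem.Str.isIn g p.2) then d.insert p.2 p.1 else d)
    PySem.Dict.empty

def pvD2 (columns : List String) : PySem.Dict String Int :=
  (pvD1 columns).items.foldl
    (fun d kv => if PySem.Str.len kv.1 < 50 then d.insert kv.1 kv.2 else d)
    PySem.Dict.empty

def pvChosen (columns : List String) : List String :=
  (List.range (pvD2 columns).keys.length).filterMap
    (fun i => if ((pvD2 columns).keys.map PySem.Str.lower).count
                  (((pvD2 columns).keys.map PySem.Str.lower).getD i "") ≤ 1
              then some ((pvD2 columns).keys.getD i "") else none)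

def pvAout (columns : List String) : List (String × Int) :=
  ((PySem.Set.ofList (pvChosen columns)).foldl
      (fun d k => d.insert k ((pvD2 columns).getD k 0)) PySem.Dict.empty).items

def pvCand (columns : List String) : PySem.Dict String Int :=
  (PySem.List.enumerate columns 0).foldl
    (fun d p => if PySem.Str.len p.2 < 50 && goodWords.any (fun g => PySem.Str.isIn g p.2)
                then d.insert p.2 p.1 else d)
    PySem.Dict.empty

def pvUnique (columns : List String) : PySem.Set String :=
  PySem.Set.ofList (singletonRuns (PySem.List.sorted (pvCand columns).keys PySem.Str.lower false))

def pvBout (columns : List String) : List (String × Int) :=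
  ((pvCand columns).items.foldl
      (fun d kv => if PySem.Set.contains (pvUnique columns) kv.1 then d.insert kv.1 kv.2 else d)
      PySem.Dict.empty).items

theorem pv_A_eq (columns : List String) : keeping_good columns = pvAout columns := rfl

theorem pv_B_eq (columns : List String) : keeping_good_alt columns = pvBout columns := rfl

theorem pv_keys_eq (d : PySem.Dict String Int) : d.keys = d.items.map Prod.fst := rfl

-- the two ports agree on every input
set_option maxHeartbeats 1000000 in
theorem pv_main (columns : List String) : keeping_good columns = keeping_good_alt columns := by
  rw [pv_A_eq, pv_B_eq]
  have hnd1 : (pvD1 columns).keys.Nodup := by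
    unfold pvD1
    refine pv_nodup_fold _ _ _ PySem.Dict.nodup_keys_empty ?_
    intro d a hd; dsimp only; split
    · exact PySem.Dict.nodup_keys_insert _ _ _ hd
    · exact hd
  have hnd2 : (pvD2 columns).keys.Nodup := by
    unfold pvD2
    refine pv_nodup_fold _ _ _ PySem.Dict.nodup_keys_empty ?_
    intro d a hd; dsimp only; split
    · exact PySem.Dict.nodup_keys_insert _ _ _ hd
    · exact hd
  have hndcand : (pvCand columns).keys.Nodup := by
    unfold pvCand
    refine pv_nodup_fold _ _ _ PySem.Dict.nodup_keys_empty ?_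
    intro d a hd; dsimp only; split
    · exact PySem.Dict.nodup_keys_insert _ _ _ hd
    · exact hd
  have h2 : (pvD2 columns).items
      = (pvD1 columns).items.filter (fun kv => decide (PySem.Str.len kv.1 < 50)) := by
    have := pv_items_condInsert_fresh (pvD1 columns).items (fun k => PySem.Str.len k < 50)
      PySem.Dict.empty (fun kv _ => PySem.Dict.contains_empty kv.1) hnd1
    unfold pvD2
    simpa using this
  have hK : (pvCand columns).items
      = (pvD1 columns).items.filter (fun kv => decide (PySem.Str.len kv.1 < 50)) := by
    unfold pvCand pvD1
    exact pv_comm (PySem.List.enumerate columns 0)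
  have hkeys2 : (pvD2 columns).keys
      = ((pvD1 columns).items.filter (fun kv => decide (PySem.Str.len kv.1 < 50))).map Prod.fst := by
    rw [pv_keys_eq, h2]
  have hkeyscand : (pvCand columns).keys
      = ((pvD1 columns).items.filter (fun kv => decide (PySem.Str.len kv.1 < 50))).map Prod.fst := by
    rw [pv_keys_eq, hK]
  set M := (pvD1 columns).items.filter (fun kv => decide (PySem.Str.len kv.1 < 50)) with hM
  have hch : pvChosen columns = (pvD2 columns).keys.filter
      (fun v => decide (((pvD2 columns).keys.map PySem.Str.lower).count (PySem.Str.lower v) ≤ 1)) := by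
    unfold pvChosen
    exact pv_filterMap_range (pvD2 columns).keys PySem.Str.lower
      (fun x => ((pvD2 columns).keys.map PySem.Str.lower).count x ≤ 1)
  have ndch : (pvChosen columns).Nodup := by rw [hch]; exact hnd2.filter _
  have hAout : pvAout columns
      = (pvChosen columns).map (fun k => (k, (pvD2 columns).getD k 0)) := by
    unfold pvAout
    rw [pv_ofList_nodup _ ndch]
    have := PySem.Dict.items_foldl_insert_fresh (pvChosen columns) (fun a => a)
      (fun a => (pvD2 columns).getD a 0) PySem.Dict.empty
      (fun a _ => PySem.Dict.contains_empty a) (by simpa using ndch)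
    simpa using this
  have hBout : pvBout columns = (pvCand columns).items.filter
      (fun kv => decide ((PySem.Set.contains (pvUnique columns) kv.1) = true)) := by
    have := pv_items_condInsert_fresh (pvCand columns).items
      (fun k => (PySem.Set.contains (pvUnique columns) k) = true)
      PySem.Dict.empty (fun kv _ => PySem.Dict.contains_empty kv.1)
      (by rw [← pv_keys_eq]; exact hndcand)
    unfold pvBout
    simpa using this
  rw [hAout, hBout, hK, hch, hkeys2, List.filter_map, List.map_map]
  -- turn the map back into the identity on the filtered items
  have hmapid : (M.filter ((fun v =>
        decide (((M.map Prod.fst).map PySem.Str.lower).count (PySem.Str.lower v) ≤ 1)) ∘ Prod.fst)).map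
        ((fun k => (k, (pvD2 columns).getD k 0)) ∘ Prod.fst)
      = M.filter ((fun v =>
        decide (((M.map Prod.fst).map PySem.Str.lower).count (PySem.Str.lower v) ≤ 1)) ∘ Prod.fst) := by
    refine (List.map_congr_left ?_).trans (List.map_id _)
    intro kv hkv
    have hkvM : kv ∈ (pvD2 columns).items := by
      rw [h2]; exact (List.mem_filter.mp hkv).1
    have := PySem.Dict.getD_of_mem_items (pvD2 columns)
      (k := kv.1) (v := kv.2) (by simpa using hkvM) hnd2 0
    simp [Function.comp, this]
  rw [hmapid]
  -- the two filter predicates agree on the members of M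
  refine List.filter_congr ?_
  intro kv hkv
  set keys := (pvCand columns).keys with hkeq
  set skeys := PySem.List.sorted keys PySem.Str.lower false with hsk
  have hkvkeys : kv.1 ∈ keys := by
    rw [hkeyscand]; exact List.mem_map_of_mem hkv
  have hkvsk : kv.1 ∈ skeys := (PySem.List.mem_sorted _ _ _ _).mpr hkvkeys
  have hperm : (skeys.map PySem.Str.lower).Perm (keys.map PySem.Str.lower) :=
    (PySem.List.sorted_perm keys PySem.Str.lower false).map _
  have hcnteq : (skeys.map PySem.Str.lower).count (PySem.Str.lower kv.1)
      = (keys.map PySem.Str.lower).count (PySem.Str.lower kv.1) := hperm.count_eq _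
  have hspair : skeys.Pairwise (fun a b => PySem.Str.lower a ≤ PySem.Str.lower b) :=
    PySem.List.sorted_pairwise keys PySem.Str.lower
  have hmemiff := singletonRuns_mem skeys hspair kv.1 hkvsk
  have hunique : (PySem.Set.contains (pvUnique columns) kv.1 = true)
      ↔ (keys.map PySem.Str.lower).count (PySem.Str.lower kv.1) = 1 := by
    rw [PySem.Set.contains_iff]
    unfold pvUnique
    rw [PySem.Set.mem_ofList, ← hkeq, ← hsk, hmemiff, hcnteq]
  have hpos : 0 < (keys.map PySem.Str.lower).count (PySem.Str.lower kv.1) :=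
    List.count_pos_iff.mpr (List.mem_map_of_mem hkvkeys)
  have hMkeys : (M.map Prod.fst).map PySem.Str.lower = keys.map PySem.Str.lower := by
    rw [hkeyscand]
  simp only [Function.comp]
  rw [hMkeys]
  simp only [decide_eq_decide]
  constructor
  · intro h; exact hunique.mpr (by omega)
  · intro h; have := hunique.mp h; omega

-- ===== VERDICT (by name: the statement is the Claim_ definition above) =====
theorem keeping_good_spec : Claim_equal_keeping_good := by
  intro columns _
  show keeping_good columns = keeping_good_alt columns
  exact pv_main columns
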